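-- pv_equiv track=rewrite | github.com/jochman/CompetitionProgramming | IEEE/Goldbach/Goldbach.py | find_goldbach
-- ===== SOURCE A (Python) =====
-- import math
--
-- def find_goldbach(number, primes):
--     run_to = math.ceil(len(primes) / 2) + 1
--     first_number = primes[run_to]
--     i = run_to - 1
--     while i > 0:
--         j = 0
--         while j < i:
--             if first_number + primes[i] + primes[j] == number:
--                 return f"{first_number} {primes[i]} {primes[j]}"
--             j += 1
--         i -= 1
--     return "counterexample"
-- ===== SOURCE B (Python) =====
-- import math
--
-- def find_goldbach(number, primes):
--     run_to = math.ceil(len(primes) / 2) + 1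
--     first_number = primes[run_to]
--     first_seen = {}
--     for idx, p in enumerate(primes[:run_to - 1]):
--         if p not in first_seen:
--             first_seen[p] = idx
--     for i in range(run_to - 1, 0, -1):
--         target = number - first_number - primes[i]
--         j = first_seen.get(target)
--         if j is not None and j < i:
--             return f"{first_number} {primes[i]} {target}"
--     return "counterexample"
-- ===== Notes on version B (the rewrite author's own statement) =====
-- stated objective: faster
-- what changed: B builds a value-to-first-index dictionary over the j-prefix once, so the inner j-scan of A's nested while loops becomes a single O(1) lookup per i (i still descending to keep A's tie-breaking).
import Mathlib
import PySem

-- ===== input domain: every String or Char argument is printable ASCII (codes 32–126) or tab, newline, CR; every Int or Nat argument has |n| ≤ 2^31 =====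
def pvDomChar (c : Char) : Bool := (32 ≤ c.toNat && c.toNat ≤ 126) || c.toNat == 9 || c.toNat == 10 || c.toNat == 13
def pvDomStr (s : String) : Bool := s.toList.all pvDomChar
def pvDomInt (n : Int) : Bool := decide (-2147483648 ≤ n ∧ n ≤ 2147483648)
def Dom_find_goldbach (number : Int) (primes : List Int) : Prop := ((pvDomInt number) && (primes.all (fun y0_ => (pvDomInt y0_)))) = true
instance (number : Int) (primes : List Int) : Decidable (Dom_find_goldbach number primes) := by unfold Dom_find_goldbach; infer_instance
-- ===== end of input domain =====

-- B replaces A's quadratic nested scan by a first-occurrence-index dictionary built once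
-- over the j-prefix, turning the inner j-loop into one lookup (objective: faster).

-- ===== PORT A =====
-- inner `while j < i` loop; fuel = i - j iterations remain.  All indices reached are
-- nonnegative and, on Pre_, in range, so `primes[j]` is `primes.getD j 0`
-- (= PySem.List.pyGetD ↑j 0 by PySem.List.pyGetD_natCast).
def fgInner (number first pI : Int) (primes : List Int) : Nat → Nat → Option String
  | _, 0 => none
  | j, fuel+1 =>
    let pj := primes.getD j 0
    if first + pI + pj = number then
      some (PySem.Int.toStr first ++ " " ++ PySem.Int.toStr pI ++ " " ++ PySem.Int.toStr pj)
    else fgInner number first pI primes (j+1) fuel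

-- outer `while i > 0` loop, i descending
def fgOuter (number first : Int) (primes : List Int) : Nat → String
  | 0 => "counterexample"
  | i+1 =>
    match fgInner number first (primes.getD (i+1) 0) primes 0 (i+1) with
    | some s => s
    | none => fgOuter number first primes i

def find_goldbach (number : Int) (primes : List Int) : String :=
  let run_to : Int := ((primes.length : Int) + 1) / 2 + 1   -- math.ceil(len/2) + 1
  match PySem.List.pyGet? primes run_to with
  | none => ""   -- Python raises IndexError here; excluded by Pre_
  | some first => fgOuter number first primes (run_to - 1).toNat

-- ===== PORT B =====
-- `for idx, p in enumerate(primes[:run_to-1]): if p not in first_seen: first_seen[p] = idx`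
def fgBuild : List Int → Int → PySem.Dict Int Int → PySem.Dict Int Int
  | [], _, d => d
  | p :: rest, idx, d => fgBuild rest (idx + 1) (if d.contains p then d else d.insert p idx)

-- `for i in range(run_to-1, 0, -1)` with one dictionary lookup per i
def fgLoop (number first : Int) (primes : List Int) (d : PySem.Dict Int Int) : Nat → String
  | 0 => "counterexample"
  | i+1 =>
    let pI := primes.getD (i+1) 0
    let target := number - first - pI
    match d.get? target with
    | some j =>
      if j < ((i : Int) + 1) then
        PySem.Int.toStr first ++ " " ++ PySem.Int.toStr pI ++ " " ++ PySem.Int.toStr target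
      else fgLoop number first primes d i
    | none => fgLoop number first primes d i

def find_goldbach_alt (number : Int) (primes : List Int) : String :=
  let run_to : Int := ((primes.length : Int) + 1) / 2 + 1
  match PySem.List.pyGet? primes run_to with
  | none => ""
  | some first =>
    let d := fgBuild (PySem.List.slice primes none (some (run_to - 1))) 0 PySem.Dict.empty
    fgLoop number first primes d (run_to - 1).toNat

-- ===== PRECONDITION & SPEC =====
-- Pre_ excludes exactly the inputs where `primes[run_to]` raises IndexError (lists of
-- length < 4); `number` is unconstrained.
def Pre_find_goldbach (_number : Int) (primes : List Int) : Prop :=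
  ((primes.length : Int) + 1) / 2 + 1 < (primes.length : Int)
instance (number : Int) (primes : List Int) : Decidable (Pre_find_goldbach number primes) := by
  unfold Pre_find_goldbach; infer_instance

def pvWitness_find_goldbach : Int × List Int := (16, [2, 3, 5, 7, 11])

def Spec_find_goldbach (number : Int) (primes : List Int) (out : String) : Prop := out = find_goldbach_alt number primes
instance (number : Int) (primes : List Int) (out : String) : Decidable (Spec_find_goldbach number primes out) := by unfold Spec_find_goldbach; infer_instance

-- ===== CLAIM (what is proved, stated in full; the proofs are below) =====
def Claim_equal_find_goldbach : Prop := ∀ (number : Int) (primes : List Int), Dom_find_goldbach number primes → Pre_find_goldbach number primes → Spec_find_goldbach number primes (find_goldbach number primes)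

-- ===== LEMMAS AND PROOFS =====

-- A's inner loop returns the shared format string iff some j in [j0, j0+fuel) matches;
-- every match prints the same value number - first - pI.
lemma fgInner_eq (number first pI : Int) (primes : List Int) :
    ∀ (fuel j0 : Nat), fgInner number first pI primes j0 fuel =
      if ∃ k, k < fuel ∧ primes.getD (j0 + k) 0 = number - first - pI then
        some (PySem.Int.toStr first ++ " " ++ PySem.Int.toStr pI ++ " " ++
              PySem.Int.toStr (number - first - pI))
      else none := by
  intro fuel
  induction fuel with
  | zero => intro j0; simp [fgInner]
  | succ n ih =>
    intro j0
    rw [fgInner]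
    by_cases h : first + pI + primes.getD j0 0 = number
    · rw [if_pos h]
      have hpj : primes.getD j0 0 = number - first - pI := by omega
      rw [if_pos (show ∃ k, k < n + 1 ∧ primes.getD (j0 + k) 0 = number - first - pI from
            ⟨0, by omega, by rw [Nat.add_zero]; exact hpj⟩), hpj]
    · rw [if_neg h, ih (j0 + 1)]
      have hiff : (∃ k, k < n ∧ primes.getD (j0 + 1 + k) 0 = number - first - pI) ↔
          (∃ k, k < n + 1 ∧ primes.getD (j0 + k) 0 = number - first - pI) := by
        constructor
        · rintro ⟨k, hk, hm⟩
          exact ⟨k + 1, by omega, by rw [show j0 + (k + 1) = j0 + 1 + k by omega]; exact hm⟩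
        · rintro ⟨k, hk, hm⟩
          cases k with
          | zero =>
            rw [Nat.add_zero] at hm
            exact absurd hm (by omega)
          | succ k' =>
            exact ⟨k', by omega, by rw [show j0 + 1 + k' = j0 + (k' + 1) by omega]; exact hm⟩
      rw [if_congr hiff rfl rfl]

-- the dictionary built by B maps v to the index of its first occurrence
lemma fgBuild_get? (v : Int) :
    ∀ (xs : List Int) (idx : Int) (d : PySem.Dict Int Int),
      (fgBuild xs idx d).get? v =
        (d.get? v).or ((PySem.List.index? xs v).map (fun (k : Nat) => idx + (k : Int))) := by
  intro xs
  induction xs with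
  | nil => intro idx d; simp [fgBuild]
  | cons p rest ih =>
    intro idx d
    rw [fgBuild, ih]
    by_cases hpv : p = v
    · subst hpv
      cases hc : d.contains p with
      | true =>
        simp only [if_true]
        obtain ⟨w, hw⟩ : ∃ w, d.get? p = some w := by
          cases hdv : d.get? p with
          | none =>
            have := (PySem.Dict.get?_eq_none_iff_contains d p).mp hdv
            rw [hc] at this
            exact absurd this (by simp)
          | some w => exact ⟨w, rfl⟩
        rw [hw]
        simp
      | false =>
        rw [if_neg Bool.false_ne_true]
        have hd : d.get? p = none := (PySem.Dict.get?_eq_none_iff_contains d p).mpr hc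
        rw [PySem.Dict.get?_insert_self, hd, PySem.List.index?_cons_self]
        simp
    · have hne : v ≠ p := fun h => hpv h.symm
      have hstep : (if d.contains p = true then d else d.insert p idx).get? v = d.get? v := by
        split
        · rfl
        · exact PySem.Dict.get?_insert_of_ne d idx hne
      have hfun : (fun (k : Nat) => idx + 1 + (k : Int)) =
          ((fun (k : Nat) => idx + (k : Int)) ∘ (fun x => x + 1)) := by
        funext k
        show idx + 1 + (k : Int) = idx + ((k + 1 : Nat) : Int)
        push_cast
        ring
      rw [hstep, PySem.List.index?_cons_of_ne _ (fun h => hpv h), Option.map_map, ← hfun]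

-- core loop agreement: with the dictionary built over primes.take N, B's loop equals
-- A's nested loops for every i ≤ N
lemma loop_agree (number first : Int) (primes : List Int) (N : Nat) (hN : N ≤ primes.length) :
    ∀ i, i ≤ N →
      fgOuter number first primes i =
        fgLoop number first primes (fgBuild (primes.take N) 0 PySem.Dict.empty) i := by
  intro i
  induction i with
  | zero => intro _; rfl
  | succ i ih =>
    intro hi
    rw [fgOuter, fgLoop]
    set pI := primes.getD (i + 1) 0 with hpI
    set target := number - first - pI with htgt
    have hget : (fgBuild (primes.take N) 0 PySem.Dict.empty).get? target =
        (PySem.List.index? (primes.take N) target).map (fun (k : Nat) => (k : Int)) := by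
      rw [fgBuild_get? target, PySem.Dict.get?_empty, Option.none_or]
      congr 1
      funext k
      ring
    rw [fgInner_eq]
    by_cases hE : ∃ k, k < i + 1 ∧ primes.getD (0 + k) 0 = number - first - pI
    · rw [if_pos hE]
      rcases hE with ⟨k, hk, hm⟩
      rw [Nat.zero_add] at hm
      have hkN : k < N := by omega
      have hkl : k < primes.length := lt_of_lt_of_le hkN hN
      have hklt : k < (primes.take N).length := by
        rw [List.length_take]; omega
      have htk : (primes.take N)[k]'hklt = target := by
        rw [List.getElem_take, ← List.getD_eq_getElem primes 0 hkl]
        rw [hm, htgt]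
      have hmem : target ∈ primes.take N := htk ▸ List.getElem_mem hklt
      obtain ⟨jx, hjx⟩ := Option.isSome_iff_exists.mp ((PySem.List.index?_isSome_iff _ _).mpr hmem)
      obtain ⟨hjlt, hjval, hjmin⟩ := PySem.List.getElem_of_index?_eq_some hjx
      have hjk : jx ≤ k := by
        by_contra hgt
        exact (hjmin k (by omega)) htk
      rw [hget, hjx]
      simp only [Option.map_some]
      rw [if_pos (by exact_mod_cast (show jx < i + 1 by omega) : ((jx : Nat) : Int) < (i : Int) + 1)]
    · rw [if_neg hE, hget]
      cases hidx : PySem.List.index? (primes.take N) target with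
      | none => exact ih (by omega)
      | some jx =>
        simp only [Option.map_some]
        obtain ⟨hjlt, hjval, _⟩ := PySem.List.getElem_of_index?_eq_some hidx
        have hjN : jx < N := by
          have := hjlt
          rw [List.length_take] at this
          omega
        have hjl : jx < primes.length := lt_of_lt_of_le hjN hN
        rw [if_neg ?_]
        · exact ih (by omega)
        · intro hlt
          have hji : jx < i + 1 := by exact_mod_cast hlt
          apply hE
          refine ⟨jx, by omega, ?_⟩
          rw [Nat.zero_add, List.getElem_take] at *
          rw [List.getD_eq_getElem primes 0 hjl, hjval, htgt]

-- ===== VERDICT (by name: the statement is the Claim_ definition above) =====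
theorem find_goldbach_spec : Claim_equal_find_goldbach := by
  intro number primes _hDom hPre
  unfold Spec_find_goldbach
  have hPre' : ((primes.length : Int) + 1) / 2 + 1 < (primes.length : Int) := hPre
  obtain ⟨m, hm⟩ : ∃ m : Nat, (m : Int) = ((primes.length : Int) + 1) / 2 + 1 :=
    ⟨(((primes.length : Int) + 1) / 2 + 1).toNat, Int.toNat_of_nonneg (by omega)⟩
  have hml : m < primes.length := by omega
  have hget : PySem.List.pyGet? primes (((primes.length : Int) + 1) / 2 + 1) =
      some primes[m] := by
    rw [← hm]
    simp [List.getElem?_eq_getElem hml]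
  have hslice : PySem.List.slice primes none (some ((((primes.length : Int) + 1) / 2 + 1) - 1)) =
      primes.take (((((primes.length : Int) + 1) / 2 + 1) - 1)).toNat :=
    PySem.List.slice_to _ (by omega)
  simp only [find_goldbach, find_goldbach_alt, hget, hslice]
  exact loop_agree number primes[m] primes _ (by omega) _ (le_refl _)
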